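-- pv_equiv track=rewrite | github.com/hjmoons/algo | problems/30645_30645/solution.py | solve
-- ===== SOURCE A (Python) =====
-- def solve(r, c, n, h):
--     max = r * c
--     dolls = {}
--     output_data = 0
--
--     for i in range(n):
--         if dolls.get(h[i]) == None:
--             dolls[h[i]] = 1
--         else:
--             dolls[h[i]] += 1
--
--     for i in dolls.keys():
--         if dolls[i] > c:
--             output_data += c
--         else:
--             output_data += dolls[i]
--
--         if output_data >= max:
--             output_data = max
--             break
--
--     return output_data
-- ===== SOURCE B (Python) =====
-- def solve(r, c, n, h):
--     lst = sorted(h[i] for i in range(n))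
--     total = 0
--     while lst:
--         x = lst[0]
--         run = 1
--         while run < len(lst) and lst[run] == x:
--             run += 1
--         total += min(run, c)
--         lst = lst[run:]
--     return min(total, r * c)
-- ===== Notes on version B (the rewrite author's own statement) =====
-- stated objective: alternative
-- what changed: Replaces the hash-map counting pass plus distinct-key loop with early break by sort-then-scan over runs of equal values, capping the total once at the end with min(total, r*c).
-- outside the precondition, e.g. on solve(2, -1, 3, [1, 2, 3]): A returns -2, B returns -3; on solve(-1, 2, 0, []): A returns 0, B returns -2
import Mathlib
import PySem

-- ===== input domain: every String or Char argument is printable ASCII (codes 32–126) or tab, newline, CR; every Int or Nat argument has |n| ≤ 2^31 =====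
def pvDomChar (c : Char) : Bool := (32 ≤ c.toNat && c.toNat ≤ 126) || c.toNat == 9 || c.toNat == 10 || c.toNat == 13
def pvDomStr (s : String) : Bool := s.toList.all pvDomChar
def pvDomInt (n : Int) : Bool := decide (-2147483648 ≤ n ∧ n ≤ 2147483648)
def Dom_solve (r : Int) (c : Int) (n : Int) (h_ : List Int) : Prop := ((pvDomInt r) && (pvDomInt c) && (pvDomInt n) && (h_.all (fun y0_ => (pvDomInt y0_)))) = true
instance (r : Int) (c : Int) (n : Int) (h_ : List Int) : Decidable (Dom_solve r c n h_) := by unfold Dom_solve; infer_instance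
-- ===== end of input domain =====

-- B replaces A's hash-map counting pass + distinct-key loop with an early break by a
-- sort-then-scan over runs of equal values, capped once at the end (objective: alternative).

-- ===== PORT A =====
def solve (r : Int) (c : Int) (n : Int) (h_ : List Int) : Int :=
  let mx := r * c
  let dolls := (PySem.List.pyRange 0 n 1).foldl (fun d i =>
      -- h[i]; the IndexError case (pyGet? = none) is excluded by Pre_solve
      if PySem.Dict.get? d ((PySem.List.pyGet? h_ i).getD 0) = none then
        PySem.Dict.insert d ((PySem.List.pyGet? h_ i).getD 0) 1
      else
        -- dolls[h[i]] += 1 ; get? is some here, the default 0 is unreachable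
        PySem.Dict.insert d ((PySem.List.pyGet? h_ i).getD 0)
          ((PySem.Dict.get? d ((PySem.List.pyGet? h_ i).getD 0)).getD 0 + 1))
    (PySem.Dict.empty : PySem.Dict Int Int)
  let st := (PySem.Dict.keys dolls).foldl (fun (st : Int × Bool) i =>
      if st.2 then st  -- 'break' modelled by a done flag
      else
        let out := if PySem.Dict.getD dolls i 0 > c then st.1 + c else st.1 + PySem.Dict.getD dolls i 0
        if out ≥ mx then (mx, true) else (out, false)) (0, false)
  st.1

-- ===== PORT B =====
-- Source B's 'while lst: count the leading run, add min(run, c), drop the run' loop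
def runScan (c : Int) : List Int → Int
  | [] => 0
  | x :: xs =>
      let run : Int := 1 + ((xs.takeWhile (fun y => y == x)).length : Int)
      min run c + runScan c (xs.dropWhile (fun y => y == x))
  termination_by l => l.length
  decreasing_by
    have := List.length_dropWhile_le (fun y => y == x) xs
    simp only [List.length_cons]; omega

def solve_alt (r : Int) (c : Int) (n : Int) (h_ : List Int) : Int :=
  let lst := PySem.List.sorted ((PySem.List.pyRange 0 n 1).map
      (fun i => (PySem.List.pyGet? h_ i).getD 0)) (fun x => x) false
  min (runScan c lst) (r * c)

-- ===== PRECONDITION & SPEC =====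
-- Pre_ excludes (a) n > len(h), where A raises IndexError, and (b) a negative capacity c or a
-- negative grid size r*c — outside the problem's natural domain — where A's early-cap break
-- interacts with negative increments and returns accidental values B does not reproduce.
def Pre_solve (r : Int) (c : Int) (n : Int) (h_ : List Int) : Prop :=
  0 ≤ c ∧ 0 ≤ r * c ∧ n ≤ h_.length
instance (r : Int) (c : Int) (n : Int) (h_ : List Int) : Decidable (Pre_solve r c n h_) := by
  unfold Pre_solve; infer_instance

def pvWitness_solve : Int × Int × Int × List Int := (2, 2, 3, [1, 1, 2])

def Spec_solve (r : Int) (c : Int) (n : Int) (h_ : List Int) (out : Int) : Prop := out = solve_alt r c n h_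
instance (r : Int) (c : Int) (n : Int) (h_ : List Int) (out : Int) : Decidable (Spec_solve r c n h_ out) := by unfold Spec_solve; infer_instance

-- ===== CLAIM (what is proved, stated in full; the proofs are below) =====
def Claim_equal_solve : Prop := ∀ (r : Int) (c : Int) (n : Int) (h_ : List Int), Dom_solve r c n h_ → Pre_solve r c n h_ → Spec_solve r c n h_ (solve r c n h_)

-- ===== LEMMAS AND PROOFS =====

-- the common value both loops accumulate before capping: ∑ over distinct values of min(count, c)
def totMin (l : List Int) (c : Int) : Int := ∑ k ∈ l.toFinset, min (l.count k : Int) c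

-- the working list both ports build from h[0..n-1]
def lstOf (n : Int) (h_ : List Int) : List Int :=
  (PySem.List.pyRange 0 n 1).map (fun i => (PySem.List.pyGet? h_ i).getD 0)

-- A's second loop: once the done flag is set the fold is constant
theorem capFold_done (step : Int × Bool → Int → Int × Bool)
    (hstep : ∀ st k, st.2 = true → step st k = st) :
    ∀ (ks : List Int) (a : Int), ks.foldl step (a, true) = (a, true) := by
  intro ks
  induction ks with
  | nil => intro a; rfl
  | cons k ks ih =>
    intro a
    rw [List.foldl_cons, hstep (a, true) k rfl, ih]

-- A's capped accumulation loop with c ≥ 0 and nonnegative per-key values = min (total, mx)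
theorem capFold_eq_min (c mx : Int) (v : Int → Int) (hc : 0 ≤ c) (hv : ∀ k, 0 ≤ v k) :
    ∀ (ks : List Int) (s : Int), s ≤ mx →
      (ks.foldl (fun (st : Int × Bool) i =>
        if st.2 then st
        else
          let out := if v i > c then st.1 + c else st.1 + v i
          if out ≥ mx then (mx, true) else (out, false)) (s, false)).1
      = min (s + (ks.map (fun k => min (v k) c)).sum) mx := by
  intro ks
  induction ks with
  | nil =>
    intro s hs
    simp
    omega
  | cons k ks ih =>
    intro s hs
    have hm : 0 ≤ min (v k) c := le_min (hv k) hc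
    have hify : (if v k > c then s + c else s + v k) = s + min (v k) c := by
      split_ifs with h
      · rw [min_eq_right h.le]
      · rw [min_eq_left (not_lt.mp h)]
    have hrest : 0 ≤ (ks.map (fun k => min (v k) c)).sum :=
      List.sum_nonneg (by
        intro x hx
        obtain ⟨k', _, rfl⟩ := List.mem_map.mp hx
        exact le_min (hv k') hc)
    rw [List.foldl_cons]
    by_cases hout : (if v k > c then s + c else s + v k) ≥ mx
    · rw [if_neg (by simp), if_pos hout,
        capFold_done _ (by intro st k h; simp [h]) ks mx, List.map_cons, List.sum_cons]
      rw [hify] at hout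
      rw [min_eq_right (by omega)]
    · rw [if_neg (by simp), if_neg hout, hify]
      rw [ih (s + min (v k) c) (by rw [hify] at hout; omega)]
      rw [List.map_cons, List.sum_cons, add_assoc]

-- B's run scan on a sorted list computes totMin
theorem runScan_sorted (c : Int) :
    ∀ (N : Nat) (l : List Int), l.length ≤ N → l.Pairwise (· ≤ ·) →
      runScan c l = totMin l c := by
  intro N
  induction N with
  | zero =>
    intro l hl _
    have : l = [] := List.length_eq_zero_iff.mp (Nat.le_zero.mp hl)
    subst this
    simp [runScan, totMin]
  | succ N ih =>
    intro l hl hp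
    match l with
    | [] => simp [runScan, totMin]
    | x :: xs =>
      have hpx : ∀ y ∈ xs, x ≤ y := (List.pairwise_cons.mp hp).1
      have hpxs : xs.Pairwise (· ≤ ·) := (List.pairwise_cons.mp hp).2
      have hxs : xs.takeWhile (fun y => y == x) ++ xs.dropWhile (fun y => y == x) = xs :=
        List.takeWhile_append_dropWhile
      have hlen : (xs.takeWhile (fun y => y == x)).length
          + (xs.dropWhile (fun y => y == x)).length = xs.length := by
        rw [← List.length_append, hxs]
      have ht : ∀ y ∈ xs.takeWhile (fun y => y == x), y = x := by
        intro y hy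
        exact eq_of_beq (List.mem_takeWhile_imp (l := xs) (p := fun y => y == x) hy)
      have hpd : (xs.dropWhile (fun y => y == x)).Pairwise (· ≤ ·) :=
        hpxs.sublist (List.dropWhile_sublist _)
      have hxd : x ∉ xs.dropWhile (fun y => y == x) := by
        intro hx
        cases hd : xs.dropWhile (fun y => y == x) with
        | nil => rw [hd] at hx; exact absurd hx (List.not_mem_nil)
        | cons y d' =>
          have hyne : ¬ (y == x) = true := by
            have := List.head?_dropWhile_not (fun y => y == x) xs
            rw [hd] at this
            simp at this
            simp [this]
          have hymem : y ∈ xs := (List.dropWhile_sublist _).mem (by rw [hd]; exact List.mem_cons_self)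
          have hxy : x < y := lt_of_le_of_ne (hpx y hymem) (fun he => hyne (by rw [← he]; exact beq_self_eq_true x))
          rw [hd] at hx
          rcases List.mem_cons.mp hx with he | hx'
          · omega
          · have : y ≤ x := by
              rw [hd] at hpd
              exact (List.pairwise_cons.mp hpd).1 x hx'
            omega
      -- counts
      have hct : (xs.takeWhile (fun y => y == x)).count x = (xs.takeWhile (fun y => y == x)).length :=
        List.count_eq_length.mpr (fun y hy => ((ht y hy).symm ▸ rfl))
      have hcd : (xs.dropWhile (fun y => y == x)).count x = 0 := List.count_eq_zero.mpr hxd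
      have hxsc : List.count x xs = (xs.takeWhile (fun y => y == x)).length := by
        conv_lhs => rw [← hxs]
        rw [List.count_append, hct, hcd]
        omega
      have hcx : (x :: xs).count x = 1 + (xs.takeWhile (fun y => y == x)).length := by
        rw [List.count_cons_self, hxsc]
        omega
      have hck : ∀ k ∈ xs.dropWhile (fun y => y == x),
          (x :: xs).count k = (xs.dropWhile (fun y => y == x)).count k := by
        intro k hk
        have hkx : k ≠ x := fun he => hxd (he ▸ hk)
        have hctk : (xs.takeWhile (fun y => y == x)).count k = 0 :=
          List.count_eq_zero.mpr (fun hkm => hkx (ht k hkm))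
        have hxsk : List.count k xs = List.count k (xs.dropWhile (fun y => y == x)) := by
          conv_lhs => rw [← hxs]
          rw [List.count_append, hctk]
          omega
        rw [List.count_cons_of_ne (by omega : x ≠ k), hxsk]
      -- finsets
      have htf : (x :: xs).toFinset = insert x (xs.dropWhile (fun y => y == x)).toFinset := by
        ext z
        simp only [List.mem_toFinset, Finset.mem_insert, List.mem_cons]
        constructor
        · rintro (rfl | hz)
          · exact Or.inl rfl
          · rw [← hxs] at hz
            rcases List.mem_append.mp hz with hz | hz
            · exact Or.inl (ht z hz)
            · exact Or.inr hz
        · rintro (rfl | hz)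
          · exact Or.inl rfl
          · exact Or.inr (by rw [← hxs]; exact List.mem_append.mpr (Or.inr hz))
      have hdlen : (xs.dropWhile (fun y => y == x)).length ≤ N := by
        simp only [List.length_cons] at hl
        omega
      have hIH := ih (xs.dropWhile (fun y => y == x)) hdlen hpd
      simp only [runScan]
      rw [hIH, totMin, totMin, htf,
        Finset.sum_insert (by rw [List.mem_toFinset]; exact hxd)]
      congr 1
      · rw [hcx]
        push_cast
        ring_nf
      · refine Finset.sum_congr rfl ?_
        intro k hk
        rw [hck k (List.mem_toFinset.mp hk)]

-- A's counting loop builds Counter(lst)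
theorem dict_eq (n : Int) (h_ : List Int) :
    (PySem.List.pyRange 0 n 1).foldl (fun d i =>
      if PySem.Dict.get? d ((PySem.List.pyGet? h_ i).getD 0) = none then
        PySem.Dict.insert d ((PySem.List.pyGet? h_ i).getD 0) 1
      else
        PySem.Dict.insert d ((PySem.List.pyGet? h_ i).getD 0)
          ((PySem.Dict.get? d ((PySem.List.pyGet? h_ i).getD 0)).getD 0 + 1))
      (PySem.Dict.empty : PySem.Dict Int Int)
    = PySem.Dict.counter (lstOf n h_) := by
  have h1 :
      (PySem.List.pyRange 0 n 1).foldl (fun d i =>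
        if PySem.Dict.get? d ((PySem.List.pyGet? h_ i).getD 0) = none then
          PySem.Dict.insert d ((PySem.List.pyGet? h_ i).getD 0) 1
        else
          PySem.Dict.insert d ((PySem.List.pyGet? h_ i).getD 0)
            ((PySem.Dict.get? d ((PySem.List.pyGet? h_ i).getD 0)).getD 0 + 1))
        (PySem.Dict.empty : PySem.Dict Int Int)
      = (PySem.List.pyRange 0 n 1).foldl (fun d i =>
          PySem.Dict.insert d ((PySem.List.pyGet? h_ i).getD 0)
            (PySem.Dict.getD d ((PySem.List.pyGet? h_ i).getD 0) 0 + 1))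
          (PySem.Dict.empty : PySem.Dict Int Int) := by
    apply PySem.List.foldl_congr_mem
    intro acc i _
    by_cases hg : PySem.Dict.get? acc ((PySem.List.pyGet? h_ i).getD 0) = none
    · rw [if_pos hg, PySem.Dict.getD_eq_get?_getD, hg]
      rfl
    · rw [if_neg hg, PySem.Dict.getD_eq_get?_getD]
  rw [h1, ← PySem.Dict.foldl_insert_getD_add_one_eq_counter (lstOf n h_)]
  unfold lstOf
  rw [List.foldl_map]

-- under Pre_, A's value is min (totMin lst c) (r*c)
theorem solveA_eq (r c n : Int) (h_ : List Int) (hc : 0 ≤ c) (hrc : 0 ≤ r * c) :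
    solve r c n h_ = min (totMin (lstOf n h_) c) (r * c) := by
  simp only [solve]
  rw [dict_eq n h_, PySem.Dict.keys_counter]
  simp only [PySem.Dict.getD_counter]
  rw [capFold_eq_min c (r * c) (fun k => ((lstOf n h_).count k : Int)) hc
    (fun k => Int.natCast_nonneg _) (PySem.Set.ofList (lstOf n h_)) 0 hrc]
  rw [zero_add]
  congr 1
  rw [totMin, ← List.sum_toFinset _ (PySem.Set.nodup_ofList (lstOf n h_))]
  rw [show (PySem.Set.ofList (lstOf n h_)).toFinset = (lstOf n h_).toFinset from
    Finset.ext (fun z => by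
      simp only [List.mem_toFinset]
      exact PySem.Set.mem_ofList _ _)]

-- under Pre_, B's value is the same min
theorem solveB_eq (r c n : Int) (h_ : List Int) :
    solve_alt r c n h_ = min (totMin (lstOf n h_) c) (r * c) := by
  simp only [solve_alt]
  rw [show (List.map (fun i => (PySem.List.pyGet? h_ i).getD 0) (PySem.List.pyRange 0 n 1))
      = lstOf n h_ from rfl]
  have hperm : (PySem.List.sorted (lstOf n h_) (fun x => x) false).Perm (lstOf n h_) :=
    PySem.List.sorted_perm (lstOf n h_) (fun x => x) false
  have hpair : (PySem.List.sorted (lstOf n h_) (fun x => x) false).Pairwise (· ≤ ·) :=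
    PySem.List.sorted_pairwise (lstOf n h_) (fun x => x)
  rw [runScan_sorted c (PySem.List.sorted (lstOf n h_) (fun x => x) false).length _ le_rfl hpair]
  congr 1
  rw [totMin, totMin, List.toFinset_eq_of_perm _ _ hperm]
  refine Finset.sum_congr rfl ?_
  intro k _
  rw [hperm.count_eq]

-- ===== VERDICT (by name: the statement is the Claim_ definition above) =====
theorem solve_spec : Claim_equal_solve := by
  intro r c n h_ _ hpre
  obtain ⟨hc, hrc, _⟩ := hpre
  unfold Spec_solve
  rw [solveA_eq r c n h_ hc hrc, solveB_eq r c n h_]
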